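-- pv_equiv track=rewrite | github.com/wanawin/seedbucketfiltercheckr | dc5_filter_recommender_v4.py | step0_generate_pool
-- ===== SOURCE A (Python) =====
-- from collections import Counter, defaultdict
-- from itertools import combinations, combinations_with_replacement
--
-- DIGITS = list(range(10))
--
-- def sort_box_str(digs):
--     return ''.join(map(str, sorted(digs)))
--
-- def step0_generate_pool(seed_digits):
--     sd = seed_digits
--     c = Counter(sd)
--     seed_pairs = set()
--     for d, cnt in c.items():
--         if cnt >= 2:
--             seed_pairs.add(tuple(sorted([d,d])))
--     uniq = sorted(c.keys())
--     for a,b in combinations(uniq, 2):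
--         seed_pairs.add(tuple(sorted([a,b])))
--     if not seed_pairs:
--         return []
--     boxes = set()
--     for x,y,z in combinations_with_replacement(DIGITS, 3):
--         add3 = [x,y,z]
--         for p in seed_pairs:
--             combo = list(p) + add3
--             cnts = Counter(combo)
--             if all(v <= 2 for v in cnts.values()):
--                 boxes.add(sort_box_str(combo))
--     return sorted(boxes)
-- ===== SOURCE B (Python) =====
-- from collections import Counter
-- from itertools import combinations
--
-- DIGITS = list(range(10))
--
-- def sort_box_str(digs):
--     return ''.join(map(str, sorted(digs)))
--
-- def _fill(caps, i, k):
--     """Nondecreasing lists of k digits starting at digit i, using digit i+j at most caps[j] times."""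
--     if k == 0:
--         return [[]]
--     if not caps:
--         return []
--     out = []
--     for m in range(min(caps[0], k) + 1):
--         for rest in _fill(caps[1:], i + 1, k - m):
--             out.append([i] * m + rest)
--     return out
--
-- def step0_generate_pool(seed_digits):
--     c = Counter(seed_digits)
--     seed_pairs = {(d, d) for d, n in c.items() if n >= 2}
--     seed_pairs.update(combinations(sorted(c), 2))
--     boxes = set()
--     for a, b in seed_pairs:
--         caps = [2 - (d == a) - (d == b) for d in DIGITS]
--         for t in _fill(caps, 0, 3):
--             boxes.add(sort_box_str([a, b] + t))
--     return sorted(boxes)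
-- ===== Notes on version B (the rewrite author's own statement) =====
-- stated objective: alternative
-- what changed: Instead of pairing each seed pair with every digit triple and filtering by a Counter of the assembled combo, B enumerates for each seed pair only the valid completions directly, recursively choosing a capped multiplicity (2 minus the pair's uses) for each digit 0-9; no per-combo Counter or <=2 filter remains.
import Mathlib
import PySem

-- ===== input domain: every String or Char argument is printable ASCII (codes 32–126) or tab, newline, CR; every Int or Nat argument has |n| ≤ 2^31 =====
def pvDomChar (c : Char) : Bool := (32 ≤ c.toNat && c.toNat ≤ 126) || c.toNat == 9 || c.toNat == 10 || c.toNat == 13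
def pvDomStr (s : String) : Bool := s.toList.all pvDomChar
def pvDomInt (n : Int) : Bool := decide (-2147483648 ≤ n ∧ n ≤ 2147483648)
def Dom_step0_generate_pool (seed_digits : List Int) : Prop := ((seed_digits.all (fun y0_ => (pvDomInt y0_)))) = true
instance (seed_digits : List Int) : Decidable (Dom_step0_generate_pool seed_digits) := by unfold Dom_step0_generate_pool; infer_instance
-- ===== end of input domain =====

-- B replaces A's triple-enumeration-plus-Counter-filter by a recursive enumeration of valid
-- completions with per-digit multiplicity caps (objective: alternative, similar cost).


-- ===== PORT A =====
-- DIGITS = list(range(10))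
def pvDIGITS : List Int := PySem.List.pyRange 0 10 1

-- itertools.combinations_with_replacement(xs, r), lexicographic order (exact by hand: PySem has no cwr)
def pvCWR (xs : List Int) (r : Nat) : List (List Int) :=
  match r, xs with
  | 0, _ => [[]]
  | _ + 1, [] => []
  | r + 1, x :: ys => (pvCWR (x :: ys) r).map (fun c => x :: c) ++ pvCWR ys (r + 1)
  termination_by (r, xs)

-- sort_box_str(digs) = ''.join(map(str, sorted(digs)))
def pvSortBoxStr (digs : List Int) : String :=
  PySem.Str.join "" ((PySem.List.sorted digs (fun x => x) false).map PySem.Int.toStr)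

-- tuple(sorted([a, b]))
def pvSortPair (a b : Int) : Int × Int := if b < a then (b, a) else (a, b)

def step0_generate_pool (seed_digits : List Int) : List String :=
  let sd := seed_digits
  let c := PySem.Dict.counter sd
  let seed_pairs : PySem.Set (Int × Int) :=
    c.items.foldl (fun s p => if p.2 ≥ 2 then PySem.Set.add s (pvSortPair p.1 p.1) else s)
      PySem.Set.empty
  let uniq := PySem.List.sorted c.keys (fun x => x) false
  let seed_pairs :=
    (PySem.List.combinations uniq 2).foldl (fun s ab =>
      match ab with
      | [a, b] => PySem.Set.add s (pvSortPair a b)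
      | _ => s) seed_pairs
  if seed_pairs = [] then []
  else
    let boxes : PySem.Set String :=
      (pvCWR pvDIGITS 3).foldl (fun boxes t =>
        seed_pairs.foldl (fun boxes p =>
          let combo := [p.1, p.2] ++ t
          let cnts := PySem.Dict.counter combo
          if cnts.values.all (fun v => decide (v ≤ 2)) then
            PySem.Set.add boxes (pvSortBoxStr combo)
          else boxes) boxes) PySem.Set.empty
    PySem.List.sorted boxes (fun x => x) false

-- ===== PORT B =====
-- _fill(caps, i, k): nondecreasing lists of k digits starting at digit i, digit i+j used at most caps[j] times
def pvFill (caps : List Int) (i : Int) (k : Nat) : List (List Int) :=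
  match caps, k with
  | _, 0 => [[]]
  | [], _ + 1 => []
  | c :: cs, k' + 1 =>
    (PySem.List.pyRange 0 (min c ((k' : Int) + 1) + 1) 1).flatMap (fun m =>
      (pvFill cs (i + 1) (k' + 1 - m.toNat)).map (fun rest => List.replicate m.toNat i ++ rest))

def step0_generate_pool_alt (seed_digits : List Int) : List String :=
  let c := PySem.Dict.counter seed_digits
  let seed_pairs : PySem.Set (Int × Int) :=
    c.items.foldl (fun s p => if p.2 ≥ 2 then PySem.Set.add s (p.1, p.1) else s)
      PySem.Set.empty
  let seed_pairs :=
    (PySem.List.combinations (PySem.List.sorted c.keys (fun x => x) false) 2).foldl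
      (fun s ab => PySem.Set.add s (ab.headI, ab.tail.headI)) seed_pairs
  let boxes : PySem.Set String :=
    seed_pairs.foldl (fun boxes p =>
      let caps := pvDIGITS.map (fun d =>
        2 - (if d == p.1 then (1 : Int) else 0) - (if d == p.2 then 1 else 0))
      (pvFill caps 0 3).foldl (fun boxes t =>
        PySem.Set.add boxes (pvSortBoxStr ([p.1, p.2] ++ t))) boxes) PySem.Set.empty
  PySem.List.sorted boxes (fun x => x) false

-- ===== PRECONDITION & SPEC =====
def Spec_step0_generate_pool (seed_digits : List Int) (out : List String) : Prop := out = step0_generate_pool_alt seed_digits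
instance (seed_digits : List Int) (out : List String) : Decidable (Spec_step0_generate_pool seed_digits out) := by unfold Spec_step0_generate_pool; infer_instance

-- ===== CLAIM (what is proved, stated in full; the proofs are below) =====
def Claim_equal_step0_generate_pool : Prop := ∀ (seed_digits : List Int), Dom_step0_generate_pool seed_digits → Spec_step0_generate_pool seed_digits (step0_generate_pool seed_digits)

-- ===== LEMMAS AND PROOFS =====

-- generic membership through a conditional-add fold over a PySem.Set
theorem pv_mem_add_if {b : Type} [BEq b] [LawfulBEq b] (s : PySem.Set b) (c : Bool) (x y : b) :
    y ∈ (if c = true then PySem.Set.add s x else s) ↔ y ∈ s ∨ (c = true ∧ y = x) := by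
  split
  · simp_all [PySem.Set.mem_add]
  · simp_all

theorem pv_mem_foldl {a b : Type} [BEq b] [LawfulBEq b] (l : List a)
    (f : PySem.Set b → a → PySem.Set b) (Q : a → b → Prop)
    (hf : ∀ s x, x ∈ l → ∀ y, y ∈ f s x ↔ y ∈ s ∨ Q x y) (s0 : PySem.Set b) (y : b) :
    y ∈ l.foldl f s0 ↔ y ∈ s0 ∨ ∃ x ∈ l, Q x y := by
  induction l generalizing s0 with
  | nil => simp
  | cons x l ih =>
    simp only [List.foldl_cons]
    rw [ih (fun s z hz => hf s z (List.mem_cons_of_mem _ hz)),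
        hf s0 x (List.mem_cons_self)]
    simp only [List.mem_cons]
    constructor
    · rintro ((h | h) | ⟨z, hz, h⟩)
      · exact Or.inl h
      · exact Or.inr ⟨x, Or.inl rfl, h⟩
      · exact Or.inr ⟨z, Or.inr hz, h⟩
    · rintro (h | ⟨z, (rfl | hz), h⟩)
      · exact Or.inl (Or.inl h)
      · exact Or.inl (Or.inr h)
      · exact Or.inr ⟨z, hz, h⟩

theorem pv_nodup_foldl {a b : Type} [BEq b] [LawfulBEq b] (l : List a)
    (f : PySem.Set b → a → PySem.Set b)
    (hf : ∀ s x, s.Nodup → (f s x).Nodup) (s0 : PySem.Set b) (h : s0.Nodup) :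
    (l.foldl f s0).Nodup := by
  induction l generalizing s0 with
  | nil => exact h
  | cons x l ih => exact ih _ (hf _ _ h)

-- Counter bridge
theorem pv_counter_all_le2 (l : List Int) :
    ((PySem.Dict.counter l).values.all (fun v => decide (v ≤ 2)) = true) ↔
      ∀ d : Int, l.count d ≤ 2 := by
  rw [PySem.Dict.values_eq_map_keys _ (PySem.Dict.nodup_keys_counter l) 0,
      PySem.Dict.keys_counter]
  simp only [List.all_map, List.all_eq_true, Function.comp, PySem.Dict.getD_counter,
    PySem.Set.mem_ofList, decide_eq_true_eq]
  constructor
  · intro h d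
    by_cases hd : d ∈ l
    · exact_mod_cast h d hd
    · simp [List.count_eq_zero_of_not_mem hd]
  · intro h d _
    exact_mod_cast h d

-- combinations_with_replacement over a strictly increasing pool: the nondecreasing r-lists of its elements
theorem pvCWR_zero (xs : List Int) : pvCWR xs 0 = [[]] := by
  rw [pvCWR.eq_def]

theorem pvCWR_nil_succ (r : Nat) : pvCWR [] (r + 1) = [] := by
  rw [pvCWR.eq_def]

theorem pvCWR_cons_succ (x : Int) (ys : List Int) (r : Nat) :
    pvCWR (x :: ys) (r + 1) =
      (pvCWR (x :: ys) r).map (fun c => x :: c) ++ pvCWR ys (r + 1) := by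
  conv_lhs => rw [pvCWR.eq_def]

theorem pv_mem_pvCWR (r : Nat) (xs : List Int) (hxs : xs.Pairwise (· < ·)) (l : List Int) :
    l ∈ pvCWR xs r ↔ l.length = r ∧ l.Pairwise (· ≤ ·) ∧ ∀ x ∈ l, x ∈ xs := by
  induction r generalizing xs l with
  | zero =>
    rw [pvCWR_zero]
    constructor
    · intro h
      simp only [List.mem_singleton] at h
      subst h; simp
    · rintro ⟨hl, -, -⟩
      rw [List.length_eq_zero_iff] at hl
      simp [hl]
  | succ r ih =>
    induction xs generalizing l with
    | nil =>
      rw [pvCWR_nil_succ]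
      simp only [List.not_mem_nil, false_iff]
      rintro ⟨hl, -, hm⟩
      cases l with
      | nil => simp at hl
      | cons z l' => exact absurd (hm z List.mem_cons_self) (by simp)
    | cons x ys ihx =>
      have hys : ys.Pairwise (· < ·) := hxs.of_cons
      have hxlt : ∀ y ∈ ys, x < y := fun y hy => List.rel_of_pairwise_cons hxs hy
      rw [pvCWR_cons_succ]
      simp only [List.mem_append, List.mem_map]
      constructor
      · rintro (⟨c, hc, rfl⟩ | h)
        · obtain ⟨hlen, hp, hm⟩ := (ih (x :: ys) hxs c).mp hc
          refine ⟨by simp [hlen], ?_, ?_⟩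
          · refine List.Pairwise.cons ?_ hp
            intro y hy
            rcases List.mem_cons.mp (hm y hy) with h' | h'
            · exact le_of_eq h'.symm
            · exact le_of_lt (hxlt y h')
          · intro w hw
            rcases List.mem_cons.mp hw with rfl | hw
            · exact List.mem_cons_self
            · exact hm w hw
        · obtain ⟨hlen, hp, hm⟩ := (ihx hys l).mp h
          exact ⟨hlen, hp, fun w hw => List.mem_cons_of_mem _ (hm w hw)⟩
      · rintro ⟨hl, hp, hm⟩
        cases l with
        | nil => simp at hl
        | cons z l' =>
          by_cases hzx : z = x
          · subst hzx
            refine Or.inl ⟨l', ?_, rfl⟩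
            refine (ih (z :: ys) hxs l').mpr ⟨by simpa using hl, hp.of_cons, ?_⟩
            intro w hw
            exact hm w (List.mem_cons_of_mem _ hw)
          · refine Or.inr ((ihx hys (z :: l')).mpr ⟨hl, hp, ?_⟩)
            have hzys : z ∈ ys := by
              rcases List.mem_cons.mp (hm z List.mem_cons_self) with h' | h'
              · exact absurd h' hzx
              · exact h'
            intro w hw
            rcases List.mem_cons.mp hw with rfl | hw'
            · exact hzys
            · have hzw : z ≤ w := List.rel_of_pairwise_cons hp hw'
              have hxz : x < z := hxlt z hzys
              rcases List.mem_cons.mp (hm w hw) with hwx | h'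
              · omega
              · exact h'

-- splitting a sorted list at its minimal value
theorem pv_sorted_split (i : Int) (l : List Int) (hs : l.Pairwise (· ≤ ·))
    (hge : ∀ x ∈ l, i ≤ x) :
    l = List.replicate (l.count i) i ++ l.filter (fun x => decide (x ≠ i)) := by
  induction l with
  | nil => simp
  | cons z l' ih =>
    have hs' := hs.of_cons
    have hge' : ∀ x ∈ l', i ≤ x := fun x hx => hge x (List.mem_cons_of_mem _ hx)
    by_cases hz : z = i
    · subst hz
      simp only [List.count_cons_self, List.replicate_succ, List.cons_append,
        List.filter_cons, decide_eq_true_eq]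
      rw [if_neg (by simp)]
      exact congrArg (z :: ·) (ih hs' hge')
    · have hzi : i < z := lt_of_le_of_ne (hge z List.mem_cons_self) (Ne.symm hz)
      have hfil : List.filter (fun x => decide (x ≠ i)) l' = l' := by
        refine List.filter_eq_self.mpr (fun x hx => ?_)
        simp only [decide_eq_true_eq]
        intro hxi
        subst hxi
        have := List.rel_of_pairwise_cons hs hx
        omega
      have hcz : (z :: l').count i = 0 := by
        refine List.count_eq_zero_of_not_mem (fun hmem => ?_)
        rcases List.mem_cons.mp hmem with h | h
        · omega
        · have := List.rel_of_pairwise_cons hs h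
          omega
      rw [hcz]
      simp only [List.replicate_zero, List.nil_append]
      rw [List.filter_cons_of_pos (by simp only [decide_eq_true_eq]; omega), hfil]

-- membership in pvFill: nondecreasing k-lists over [i, i+len caps) with per-digit caps
theorem pv_mem_pvFill (caps : List Int) (i : Int) (k : Nat)
    (hcaps : ∀ c ∈ caps, 0 ≤ c) (l : List Int) :
    l ∈ pvFill caps i k ↔
      l.length = k ∧ l.Pairwise (· ≤ ·) ∧
      (∀ x ∈ l, i ≤ x ∧ x < i + caps.length) ∧
      (∀ j : Nat, j < caps.length → (l.count (i + (j : Int)) : Int) ≤ caps[j]!) := by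
  induction caps generalizing i k l with
  | nil =>
    cases k with
    | zero =>
      simp only [pvFill, List.mem_singleton]
      constructor
      · rintro rfl; simp
      · rintro ⟨hl, -, -, -⟩
        exact List.length_eq_zero_iff.mp hl
    | succ k' =>
      simp only [pvFill, List.not_mem_nil, false_iff]
      rintro ⟨hl, -, hm, -⟩
      cases l with
      | nil => simp at hl
      | cons z l' =>
        have := hm z List.mem_cons_self
        simp only [List.length_nil] at this
        omega
  | cons c cs ih =>
    have hc : 0 ≤ c := hcaps c List.mem_cons_self
    have hcaps' : ∀ x ∈ cs, 0 ≤ x := fun x hx => hcaps x (List.mem_cons_of_mem _ hx)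
    cases k with
    | zero =>
      simp only [pvFill, List.mem_singleton]
      constructor
      · rintro rfl
        refine ⟨rfl, by simp, by simp, fun j hj => ?_⟩
        have hjl : j < (c :: cs).length := by simpa using hj
        rw [getElem!_pos (c :: cs) j hjl]
        simpa using hcaps _ (List.getElem_mem hjl)
      · rintro ⟨hl, -, -, -⟩
        exact List.length_eq_zero_iff.mp hl
    | succ k' =>
      simp only [pvFill, List.mem_flatMap, List.mem_map]
      constructor
      · rintro ⟨m, hm, rest, hrest, rfl⟩
        rw [PySem.List.mem_pyRange_one] at hm
        have hm0 : 0 ≤ m := hm.1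
        have hmc : m ≤ c := by omega
        have hmk : m.toNat ≤ k' + 1 := by omega
        obtain ⟨hrl, hrp, hrm, hrc⟩ := (ih (i + 1) (k' + 1 - m.toNat) hcaps' rest).mp hrest
        have hresti : ∀ x ∈ rest, i + 1 ≤ x := fun x hx => (hrm x hx).1
        refine ⟨?_, ?_, ?_, ?_⟩
        · simp only [List.length_append, List.length_replicate, hrl]; omega
        · refine List.pairwise_append.mpr ⟨?_, hrp, ?_⟩
          · exact List.pairwise_replicate.mpr (Or.inr le_rfl)
          · intro x hx y hy
            have hxi : x = i := List.eq_of_mem_replicate hx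
            have := hresti y hy
            omega
        · intro x hx
          rcases List.mem_append.mp hx with hx | hx
          · have hxi : x = i := List.eq_of_mem_replicate hx
            simp only [List.length_cons]
            push_cast
            omega
          · have := hrm x hx
            simp only [List.length_cons]
            push_cast at this ⊢
            omega
        · intro j hj
          simp only [List.count_append]
          cases j with
          | zero =>
            have hcrep : (List.replicate m.toNat i).count i = m.toNat := by simp
            have hcrest : rest.count i = 0 := by
              refine List.count_eq_zero_of_not_mem (fun hmem => ?_)
              have := hresti i hmem
              omega
            simp only [Int.natCast_zero, add_zero, List.getElem!_cons_zero]
            rw [hcrep, hcrest]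
            omega
          | succ j' =>
            have hne : i + ((j' : Int) + 1) ≠ i := by omega
            have hrep0 : (List.replicate m.toNat i).count (i + ((j' : Int) + 1)) = 0 := by
              refine List.count_eq_zero_of_not_mem (fun hmem => ?_)
              exact hne (List.eq_of_mem_replicate hmem)
            have := hrc j' (by simpa using hj)
            have harr : (i + 1) + (j' : Int) = i + ((j' : Int) + 1) := by ring
            rw [harr] at this
            have hget : (c :: cs)[j' + 1]! = cs[j']! := by
              simp
            push_cast
            rw [hrep0, hget]
            omega
      · rintro ⟨hl, hp, hm, hcnt⟩
        have hge : ∀ x ∈ l, i ≤ x := fun x hx => (hm x hx).1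
        set m := l.count i with hmdef
        have hmle : m ≤ k' + 1 := hl ▸ List.count_le_length
        have hmc : (m : Int) ≤ c := by
          have h0 := hcnt 0 (by simp)
          simp only [Int.natCast_zero, add_zero, List.getElem!_cons_zero] at h0
          exact h0
        refine ⟨(m : Int), ?_, l.filter (fun x => decide (x ≠ i)), ?_, ?_⟩
        · rw [PySem.List.mem_pyRange_one]
          constructor
          · exact Int.natCast_nonneg m
          · omega
        · have hsplit := pv_sorted_split i l hp hge
          have hflen : (l.filter (fun x => decide (x ≠ i))).length = k' + 1 - m := by
            have := congrArg List.length hsplit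
            simp only [List.length_append, List.length_replicate] at this
            omega
          refine (ih (i + 1) (k' + 1 - (m : Int).toNat) hcaps' _).mpr ⟨?_, ?_, ?_, ?_⟩
          · rw [hflen]; omega
          · exact hp.filter _
          · intro x hx
            rw [List.mem_filter] at hx
            have h1 := hm x hx.1
            have h2 := hx.2
            simp only [decide_eq_true_eq] at h2
            have : i ≤ x := h1.1
            have hxlen := h1.2
            simp only [List.length_cons] at hxlen
            push_cast at hxlen ⊢
            omega
          · intro j hj
            have hne : (i + 1) + (j : Int) ≠ i := by omega
            have hrep0 : (List.replicate (l.count i) i).count ((i + 1) + (j : Int)) = 0 := by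
              refine List.count_eq_zero_of_not_mem (fun hmem => ?_)
              exact hne (List.eq_of_mem_replicate hmem)
            have hfc : (l.filter (fun x => decide (x ≠ i))).count ((i + 1) + (j : Int)) =
                l.count ((i + 1) + (j : Int)) := by
              conv_rhs => rw [pv_sorted_split i l hp hge]
              rw [List.count_append, hrep0, Nat.zero_add]
            rw [hfc]
            have := hcnt (j + 1) (by simpa using hj)
            have harr : i + ((j : Int) + 1) = (i + 1) + (j : Int) := by ring
            push_cast at this
            rw [harr] at this
            have hget : (c :: cs)[j + 1]! = cs[j]! := by
              simp
            rw [hget] at this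
            exact this
        · have hsplit := pv_sorted_split i l hp hge
          rw [← hmdef] at hsplit
          have : (m : Int).toNat = m := by omega
          rw [this]
          exact hsplit.symm

-- B's caps list, and its entries
def pvCaps (pa pb : Int) : List Int :=
  pvDIGITS.map (fun d => 2 - (if d == pa then (1 : Int) else 0) - (if d == pb then 1 else 0))

theorem pv_digits_eq : pvDIGITS = [0, 1, 2, 3, 4, 5, 6, 7, 8, 9] := by decide

theorem pv_caps_get (pa pb : Int) (j : Nat) (hj : j < 10) :
    (pvCaps pa pb)[j]! =
      2 - (if (j : Int) = pa then (1 : Int) else 0) - (if (j : Int) = pb then 1 else 0) := by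
  unfold pvCaps
  rw [pv_digits_eq]
  interval_cases j <;> simp

theorem pv_caps_len (pa pb : Int) : (pvCaps pa pb).length = 10 := by
  unfold pvCaps
  rw [pv_digits_eq]
  rfl

-- the crux: per pair, B's capped enumeration = A's triples passing the Counter filter
theorem pv_crux (pa pb : Int) (t : List Int) :
    t ∈ pvFill (pvCaps pa pb) 0 3 ↔
      t ∈ pvCWR pvDIGITS 3 ∧ ∀ d : Int, (pa :: pb :: t).count d ≤ 2 := by
  have hdig : pvDIGITS.Pairwise (· < ·) := by
    simpa [pvDIGITS] using PySem.List.pairwise_lt_pyRange_one (a := 0) (b := 10)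
  have hmemD : ∀ d : Int, d ∈ pvDIGITS ↔ 0 ≤ d ∧ d < 10 := by
    intro d; simp [pvDIGITS, PySem.List.mem_pyRange_one]
  have hcapsnn : ∀ c ∈ pvCaps pa pb, 0 ≤ c := by
    intro c hc
    simp only [pvCaps, List.mem_map] at hc
    obtain ⟨d, hd, rfl⟩ := hc
    split_ifs <;> omega
  have hcount2 : ∀ (u : List Int) (d : Int),
      (pa :: pb :: u).count d =
        (if d = pa then 1 else 0) + (if d = pb then 1 else 0) + u.count d := by
    intro u d
    simp [List.count_cons]
    split_ifs <;> omega
  rw [pv_mem_pvFill _ _ _ hcapsnn, pv_mem_pvCWR 3 pvDIGITS hdig, pv_caps_len]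
  constructor
  · rintro ⟨hlen, hp, hm, hcnt⟩
    have hmD : ∀ x ∈ t, x ∈ pvDIGITS := by
      intro x hx
      have := hm x hx
      rw [hmemD]
      push_cast at this
      omega
    refine ⟨⟨hlen, hp, hmD⟩, ?_⟩
    intro d
    rw [hcount2]
    by_cases hd : 0 ≤ d ∧ d < 10
    · obtain ⟨j, hj, hdj⟩ : ∃ j : Nat, j < 10 ∧ d = (j : Int) := ⟨d.toNat, by omega, by omega⟩
      subst hdj
      have := hcnt j hj
      rw [pv_caps_get pa pb j hj] at this
      simp only [zero_add] at this
      split_ifs at this ⊢ <;> omega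
    · have h0 : t.count d = 0 := by
        refine List.count_eq_zero_of_not_mem (fun hmem => ?_)
        exact hd ((hmemD d).mp (hmD d hmem))
      rw [h0]
      split_ifs <;> omega
  · rintro ⟨⟨hlen, hp, hmD⟩, hcond⟩
    refine ⟨hlen, hp, ?_, ?_⟩
    · intro x hx
      have := (hmemD x).mp (hmD x hx)
      push_cast
      omega
    · intro j hj
      have := hcond (j : Int)
      rw [hcount2] at this
      rw [pv_caps_get pa pb j hj]
      simp only [zero_add]
      split_ifs at this ⊢ <;> omega

-- the two box sets (as sorted lists) coincide for any pair list P
theorem pv_boxes_eq (P : List (Int × Int)) :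
    PySem.List.sorted
      ((pvCWR pvDIGITS 3).foldl (fun boxes t =>
        P.foldl (fun boxes p =>
          if (PySem.Dict.counter ([p.1, p.2] ++ t)).values.all (fun v => decide (v ≤ 2)) then
            PySem.Set.add boxes (pvSortBoxStr ([p.1, p.2] ++ t))
          else boxes) boxes) PySem.Set.empty) (fun x => x) false
    = PySem.List.sorted
      (P.foldl (fun boxes p =>
        (pvFill (pvCaps p.1 p.2) 0 3).foldl (fun boxes t =>
          PySem.Set.add boxes (pvSortBoxStr ([p.1, p.2] ++ t))) boxes) PySem.Set.empty)
      (fun x => x) false := by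
  have hnodA : ((pvCWR pvDIGITS 3).foldl (fun boxes t =>
      P.foldl (fun boxes p =>
        if (PySem.Dict.counter ([p.1, p.2] ++ t)).values.all (fun v => decide (v ≤ 2)) then
          PySem.Set.add boxes (pvSortBoxStr ([p.1, p.2] ++ t))
        else boxes) boxes) (PySem.Set.empty : PySem.Set String)).Nodup := by
    refine pv_nodup_foldl _ _ (fun s t hs => ?_) _ (by simp [PySem.Set.empty])
    refine pv_nodup_foldl _ _ (fun s' p hs' => ?_) _ hs
    split
    · exact PySem.Set.nodup_add _ _ hs'
    · exact hs'
  have hnodB : (P.foldl (fun boxes p =>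
      (pvFill (pvCaps p.1 p.2) 0 3).foldl (fun boxes t =>
        PySem.Set.add boxes (pvSortBoxStr ([p.1, p.2] ++ t))) boxes)
      (PySem.Set.empty : PySem.Set String)).Nodup := by
    refine pv_nodup_foldl _ _ (fun s p hs => ?_) _ (by simp [PySem.Set.empty])
    refine pv_nodup_foldl _ _ (fun s' t hs' => ?_) _ hs
    exact PySem.Set.nodup_add _ _ hs'
  apply PySem.List.sorted_eq_sorted_of_perm _ _ _ (fun a b h => h)
  refine (List.perm_ext_iff_of_nodup hnodA hnodB).mpr ?_
  intro y
  rw [pv_mem_foldl _ _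
      (fun t y => ∃ p ∈ P, (∀ d : Int, (p.1 :: p.2 :: t).count d ≤ 2) ∧
        y = pvSortBoxStr (p.1 :: p.2 :: t))
      (fun s t _ y => by
        rw [pv_mem_foldl _ _
          (fun p y => (∀ d : Int, (p.1 :: p.2 :: t).count d ≤ 2) ∧
            y = pvSortBoxStr (p.1 :: p.2 :: t))
          (fun s' p _ y' => by
            rw [pv_mem_add_if]
            simp only [List.cons_append, List.nil_append, pv_counter_all_le2]) s y])
      PySem.Set.empty y,
    pv_mem_foldl _ _
      (fun p y => ∃ t ∈ pvFill (pvCaps p.1 p.2) 0 3, y = pvSortBoxStr (p.1 :: p.2 :: t))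
      (fun s p _ y => by
        rw [pv_mem_foldl _ _
          (fun t y => y = pvSortBoxStr (p.1 :: p.2 :: t))
          (fun s' t _ y' => by
            simp [PySem.Set.mem_add]) s y])
      PySem.Set.empty y]
  simp only [PySem.Set.empty, List.not_mem_nil, false_or]
  constructor
  · rintro ⟨t, ht, p, hp, hcond, rfl⟩
    exact ⟨p, hp, t, (pv_crux p.1 p.2 t).mpr ⟨ht, hcond⟩, rfl⟩
  · rintro ⟨p, hp, t, ht, rfl⟩
    obtain ⟨htc, hcond⟩ := (pv_crux p.1 p.2 t).mp ht
    exact ⟨t, htc, p, hp, hcond, rfl⟩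

-- ===== VERDICT (by name: the statement is the Claim_ definition above) =====
theorem step0_generate_pool_spec : Claim_equal_step0_generate_pool := by
  intro sd _
  show step0_generate_pool sd = step0_generate_pool_alt sd
  unfold step0_generate_pool step0_generate_pool_alt
  simp only []
  have huniq : (PySem.List.sorted (PySem.Dict.counter sd).keys (fun x => x) false).Pairwise (· < ·) := by
    rw [PySem.Dict.keys_counter]
    exact PySem.List.sorted_ofList_pairwise_lt sd
  have h1 : List.foldl
        (fun (s : PySem.Set (Int × Int)) p => if p.2 ≥ 2 then s.add (pvSortPair p.1 p.1) else s)
        PySem.Set.empty (PySem.Dict.counter sd).items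
      = List.foldl (fun s p => if p.2 ≥ 2 then s.add (p.1, p.1) else s)
        PySem.Set.empty (PySem.Dict.counter sd).items := by
    apply PySem.List.foldl_congr_mem
    intro acc p hp
    have : pvSortPair p.1 p.1 = (p.1, p.1) := by
      unfold pvSortPair
      rw [if_neg (by omega)]
    rw [this]
  have h2 : ∀ (init : PySem.Set (Int × Int)),
      List.foldl
        (fun s ab => match ab with | [a, b] => s.add (pvSortPair a b) | _ => s) init
        (PySem.List.combinations
          (PySem.List.sorted (PySem.Dict.counter sd).keys (fun x => x) false) 2)
      = List.foldl
        (fun s ab => s.add (ab.headI, ab.tail.headI)) init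
        (PySem.List.combinations
          (PySem.List.sorted (PySem.Dict.counter sd).keys (fun x => x) false) 2) := by
    intro init
    apply PySem.List.foldl_congr_mem
    intro acc ab hab
    obtain ⟨hsub, hlen⟩ := (PySem.List.mem_combinations_iff _ _ _).mp hab
    match ab, hlen with
    | [a, b], _ =>
      have hpw : ([a, b] : List Int).Pairwise (· < ·) := huniq.sublist hsub
      have hlt : a < b := by
        have := List.rel_of_pairwise_cons hpw (List.mem_cons_self)
        exact this
      show PySem.Set.add acc (pvSortPair a b) = PySem.Set.add acc (([a, b] : List Int).headI, ([a, b] : List Int).tail.headI)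
      have : pvSortPair a b = (a, b) := by
        unfold pvSortPair
        rw [if_neg (by omega)]
      rw [this]
      rfl
  rw [h1, h2]
  split
  next h =>
    rw [h]
    rfl
  next =>
    exact pv_boxes_eq _
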